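-- pv_equiv track=rewrite | github.com/TheIllusionOfLife/Factorization | src/strategy.py | blend_modulus_filters
-- ===== SOURCE A (Python) =====
-- from typing import List, Sequence, Tuple
--
-- def blend_modulus_filters(
--     filters1: List[Tuple[int, List[int]]],
--     filters2: List[Tuple[int, List[int]]],
--     max_filters: int = 4,
-- ) -> List[Tuple[int, List[int]]]:
--     """
--     Blend modulus filters from two parents, prioritizing diversity.
--
--     Combines filters from both parents:
--     - Merges filters with same modulus (union of residues)
--     - Keeps unique filters from each parent
--     - Limits total to max_filters (prioritizes smaller moduli)
--
--     Args:
--         filters1: Modulus filters from parent 1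
--         filters2: Modulus filters from parent 2
--         max_filters: Maximum number of filters to keep (default: 4)
--
--     Returns:
--         Blended list of (modulus, residues) tuples
--     """
--     # Merge filters by modulus using set operations for efficiency
--     filter_dict: dict[int, List[int]] = {}
--
--     for modulus, residues in filters1 + filters2:
--         if modulus in filter_dict:
--             # Merge residues for same modulus using set union
--             filter_dict[modulus] = sorted(set(filter_dict[modulus]) | set(residues))
--         else:
--             filter_dict[modulus] = sorted(set(residues))
--
--     # Convert back to list, sorted by modulus (prioritize smaller moduli)
--     blended = [(mod, res) for mod, res in sorted(filter_dict.items())]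
--
--     # Limit to max_filters
--     return blended[:max_filters]
-- ===== SOURCE B (Python) =====
-- def blend_modulus_filters(filters1, filters2, max_filters=4):
--     # Sort all (modulus, residues) pairs by modulus once, then merge adjacent
--     # runs of equal moduli in one linear scan; no dictionary is used.
--     pairs = sorted(filters1 + filters2, key=lambda p: p[0])
--     groups = []  # (modulus, raw residues) per run, moduli strictly increasing
--     for m, res in pairs:
--         if groups and groups[-1][0] == m:
--             groups[-1][1].extend(res)
--         else:
--             groups.append((m, list(res)))
--     blended = [(m, sorted(set(r))) for m, r in groups]
--     return blended[:max_filters]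
-- ===== Notes on version B (the rewrite author's own statement) =====
-- stated objective: faster
-- what changed: B replaces A's dict-of-merged-sets (which rebuilds and re-sorts a modulus's whole residue set at every repeated occurrence of that modulus) by sort-then-scan: sort all pairs by modulus once, merge adjacent equal-modulus runs in one linear scan, and dedupe/sort each group's residues once at the end; no dictionary at all.
import Mathlib
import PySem

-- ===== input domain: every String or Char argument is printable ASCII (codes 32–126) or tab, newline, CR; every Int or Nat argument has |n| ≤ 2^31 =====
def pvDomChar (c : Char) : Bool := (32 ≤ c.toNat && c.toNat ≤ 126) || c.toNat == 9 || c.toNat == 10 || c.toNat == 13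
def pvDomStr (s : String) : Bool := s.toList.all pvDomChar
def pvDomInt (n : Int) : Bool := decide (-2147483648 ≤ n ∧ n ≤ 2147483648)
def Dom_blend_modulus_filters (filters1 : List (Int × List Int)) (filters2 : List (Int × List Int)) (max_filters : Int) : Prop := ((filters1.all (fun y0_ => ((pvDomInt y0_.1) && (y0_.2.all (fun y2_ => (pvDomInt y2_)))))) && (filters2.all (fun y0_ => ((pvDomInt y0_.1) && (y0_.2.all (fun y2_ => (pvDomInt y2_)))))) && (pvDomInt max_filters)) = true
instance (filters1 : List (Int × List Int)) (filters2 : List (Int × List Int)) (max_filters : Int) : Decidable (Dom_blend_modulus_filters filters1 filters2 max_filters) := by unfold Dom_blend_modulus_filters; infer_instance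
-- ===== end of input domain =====

-- B sorts all pairs by modulus once and merges adjacent equal-modulus runs in one linear
-- scan (no dictionary), instead of A's dict whose merged residue set is re-sorted at every
-- repeated occurrence of a modulus.


-- ===== PORT A =====
def blend_modulus_filters (filters1 : List (Int × List Int)) (filters2 : List (Int × List Int)) (max_filters : Int) : List (Int × List Int) :=
  let filter_dict : PySem.Dict Int (List Int) :=
    (filters1 ++ filters2).foldl (fun d p =>
      if d.contains p.1 then
        d.insert p.1 (PySem.List.sorted (PySem.Set.union (PySem.Set.ofList (d.getD p.1 [])) (PySem.Set.ofList p.2)) (fun x => x) false)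
      else
        d.insert p.1 (PySem.List.sorted (PySem.Set.ofList p.2) (fun x => x) false)) PySem.Dict.empty
  -- Python sorts the (modulus, residues) tuples lexicographically; dict keys are distinct, so the
  -- comparison is decided by the modulus alone: sorting by the first component is exact here.
  let blended := (PySem.List.sorted filter_dict.items (fun q => q.1) false).map (fun q => (q.1, q.2))
  PySem.List.slice blended none (some max_filters)

-- ===== PORT B =====
-- the loop body of Source B: `groups` is built head-first (the head is Python's groups[-1])
-- and reversed at the end — the standard rendering of an append-to-end loop that
-- mutates only its last element.
def pvGroupStep (acc : List (Int × List Int)) (p : Int × List Int) : List (Int × List Int) :=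
  match acc with
  | (m, r) :: t => if m = p.1 then (m, r ++ p.2) :: t else (p.1, p.2) :: (m, r) :: t
  | [] => [(p.1, p.2)]

def blend_modulus_filters_alt (filters1 : List (Int × List Int)) (filters2 : List (Int × List Int)) (max_filters : Int) : List (Int × List Int) :=
  let pairs := PySem.List.sorted (filters1 ++ filters2) (fun p => p.1) false
  let groups := (pairs.foldl pvGroupStep []).reverse
  let blended := groups.map (fun q => (q.1, PySem.List.sorted (PySem.Set.ofList q.2) (fun x => x) false))
  PySem.List.slice blended none (some max_filters)

-- ===== PRECONDITION & SPEC =====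
def Spec_blend_modulus_filters (filters1 : List (Int × List Int)) (filters2 : List (Int × List Int)) (max_filters : Int) (out : List (Int × List Int)) : Prop := out = blend_modulus_filters_alt filters1 filters2 max_filters
instance (filters1 : List (Int × List Int)) (filters2 : List (Int × List Int)) (max_filters : Int) (out : List (Int × List Int)) : Decidable (Spec_blend_modulus_filters filters1 filters2 max_filters out) := by unfold Spec_blend_modulus_filters; infer_instance

-- ===== CLAIM (what is proved, stated in full; the proofs are below) =====
def Claim_equal_blend_modulus_filters : Prop := ∀ (filters1 : List (Int × List Int)) (filters2 : List (Int × List Int)) (max_filters : Int), Dom_blend_modulus_filters filters1 filters2 max_filters → Spec_blend_modulus_filters filters1 filters2 max_filters (blend_modulus_filters filters1 filters2 max_filters)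

-- ===== LEMMAS AND PROOFS =====

-- abbreviation for Python's sorted(set(v))
def pvSS (v : List Int) : List Int := PySem.List.sorted (PySem.Set.ofList v) (fun x => x) false

-- all residues attached to modulus k in l, in order of appearance
def pvRes (l : List (Int × List Int)) (k : Int) : List Int :=
  (l.filter (fun p => p.1 == k)).flatMap (fun p => p.2)

-- A's loop body, named for the proofs (definitionally the lambda in port A)
def pvStepA (d : PySem.Dict Int (List Int)) (p : Int × List Int) : PySem.Dict Int (List Int) :=
  if d.contains p.1 then
    d.insert p.1 (PySem.List.sorted (PySem.Set.union (PySem.Set.ofList (d.getD p.1 [])) (PySem.Set.ofList p.2)) (fun x => x) false)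
  else
    d.insert p.1 (PySem.List.sorted (PySem.Set.ofList p.2) (fun x => x) false)

-- ghost dict loop used only by the proof: group each modulus's raw residues
def pvStepB (d : PySem.Dict Int (List Int)) (p : Int × List Int) : PySem.Dict Int (List Int) :=
  d.modify p.1 [] (fun v => v ++ p.2)

-- sorted(set(sorted(set(L)) | set(res))) collapses: it is sorted(set(L ++ res))
lemma pvSS_union (L res : List Int) :
    PySem.List.sorted (PySem.Set.union (PySem.Set.ofList (pvSS L)) (PySem.Set.ofList res)) (fun x => x) false
      = pvSS (L ++ res) := by
  unfold pvSS
  apply PySem.List.sorted_eq_sorted_of_perm _ _ _ (fun a b h => h)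
  rw [List.perm_ext_iff_of_nodup
    (PySem.Set.nodup_union _ _ (PySem.Set.nodup_ofList _)) (PySem.Set.nodup_ofList _)]
  intro a
  simp [PySem.Set.mem_union, PySem.Set.mem_ofList, PySem.List.mem_sorted, List.mem_append]

-- sorted(set ·) only depends on membership
lemma pvSS_congr (v w : List Int) (h : ∀ a, a ∈ v ↔ a ∈ w) : pvSS v = pvSS w := by
  unfold pvSS
  apply PySem.List.sorted_eq_sorted_of_perm _ _ _ (fun a b hh => hh)
  rw [List.perm_ext_iff_of_nodup (PySem.Set.nodup_ofList _) (PySem.Set.nodup_ofList _)]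
  intro a
  simp [PySem.Set.mem_ofList, h a]

lemma pvStep_keys (dA dB : PySem.Dict Int (List Int)) (p : Int × List Int)
    (hk : dA.keys = dB.keys) : (pvStepA dA p).keys = (pvStepB dB p).keys := by
  have hc : dA.contains p.1 = dB.contains p.1 := by
    rw [PySem.Dict.contains_eq_decide_mem_keys, PySem.Dict.contains_eq_decide_mem_keys, hk]
  unfold pvStepA pvStepB
  rw [PySem.Dict.keys_modify]
  cases h : dB.contains p.1 with
  | true =>
    rw [if_pos (hc.trans h), PySem.Dict.keys_insert_of_contains _ _ (hc.trans h),
      PySem.Dict.keys_insert_of_contains _ _ h, hk]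
  | false =>
    rw [if_neg (by simp [hc.trans h]), PySem.Dict.keys_insert_of_not_contains _ _ (hc.trans h),
      PySem.Dict.keys_insert_of_not_contains _ _ h, hk]

lemma pvStep_getD (dA dB : PySem.Dict Int (List Int)) (p : Int × List Int) (k : Int)
    (hk : dA.keys = dB.keys) (hv : ∀ k, dA.getD k [] = pvSS (dB.getD k [])) :
    (pvStepA dA p).getD k [] = pvSS ((pvStepB dB p).getD k []) := by
  have hc : dA.contains p.1 = dB.contains p.1 := by
    rw [PySem.Dict.contains_eq_decide_mem_keys, PySem.Dict.contains_eq_decide_mem_keys, hk]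
  unfold pvStepA pvStepB
  rw [PySem.Dict.getD_modify]
  cases h : dB.contains p.1 with
  | true =>
    rw [if_pos (hc.trans h), PySem.Dict.getD_insert]
    by_cases hm : k = p.1
    · rw [if_pos hm, if_pos hm, hv p.1, pvSS_union]
    · rw [if_neg hm, if_neg hm, hv k]
  | false =>
    rw [if_neg (by simp [hc.trans h]), PySem.Dict.getD_insert,
      PySem.Dict.getD_of_not_contains _ _ h]
    by_cases hm : k = p.1
    · rw [if_pos hm, if_pos hm]; unfold pvSS; rw [List.nil_append]
    · rw [if_neg hm, if_neg hm, hv k]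

-- the loop invariant: same keys, and A's stored value is sorted(set ·) of the ghost's
lemma pvInv (l : List (Int × List Int)) (dA dB : PySem.Dict Int (List Int))
    (hk : dA.keys = dB.keys) (hv : ∀ k, dA.getD k [] = pvSS (dB.getD k [])) :
    (l.foldl pvStepA dA).keys = (l.foldl pvStepB dB).keys ∧
      ∀ k, (l.foldl pvStepA dA).getD k [] = pvSS ((l.foldl pvStepB dB).getD k []) := by
  induction l generalizing dA dB with
  | nil => exact ⟨hk, hv⟩
  | cons p t ih =>
    simp only [List.foldl_cons]
    exact ih _ _ (pvStep_keys dA dB p hk) (fun k => pvStep_getD dA dB p k hk hv)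

-- a dict with nodup keys, sorted by key, is the key-sorted list of (k, getD k)
lemma pvSortedItems (d : PySem.Dict Int (List Int)) (h : d.keys.Nodup) :
    PySem.List.sorted d.items (fun q => q.1) false
      = (PySem.List.sorted d.keys (fun x => x) false).map (fun k => (k, d.getD k [])) := by
  have hitems : d.items = d.keys.map (fun k => (k, d.getD k [])) := by
    have h1 : d.items.map (fun p => (p.1, d.getD p.1 ([] : List Int))) = d.items.map id := by
      apply List.map_congr_left
      rintro ⟨k, v⟩ hp
      simp [PySem.Dict.getD_of_mem_items d hp h]
    calc d.items = d.items.map id := by simp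
      _ = d.keys.map (fun k => (k, d.getD k [])) := by
          simp only [PySem.Dict.keys, List.map_map]
          exact h1.symm
  apply PySem.List.sorted_eq_of_perm_of_pairwise_lt
  · rw [hitems]
    exact (PySem.List.sorted_perm _ _ _).map _
  · rw [List.pairwise_map]
    have hs : (PySem.List.sorted d.keys (fun x => x) false).Pairwise (· ≤ ·) :=
      PySem.List.sorted_pairwise _ _
    have hn : (PySem.List.sorted d.keys (fun x => x) false).Nodup :=
      (PySem.List.sorted_perm _ _ _).nodup_iff.mpr h
    exact (hs.and hn).imp (fun hab => lt_of_le_of_ne hab.1 hab.2)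

-- ghost dict: value at k is the concatenation of k's residues
lemma pvB_getD (l : List (Int × List Int)) (d : PySem.Dict Int (List Int)) (k : Int) :
    (l.foldl pvStepB d).getD k [] = d.getD k [] ++ pvRes l k := by
  induction l generalizing d with
  | nil => simp [pvRes]
  | cons p t ih =>
    simp only [List.foldl_cons, ih, pvRes, List.filter_cons]
    unfold pvStepB
    rw [PySem.Dict.getD_modify]
    by_cases hm : k = p.1
    · simp [hm, List.append_assoc]
    · have : (p.1 == k) = false := by simp [Ne.symm hm]
      simp [hm, this]

-- the grouping fold never touches entries below the top group
lemma pvGroup_append (s : List (Int × List Int)) :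
    ∀ (m : Int) (r : List Int) (a t : List (Int × List Int)),
    s.foldl pvGroupStep (((m, r) :: a) ++ t) = (s.foldl pvGroupStep ((m, r) :: a)) ++ t := by
  induction s with
  | nil => intro m r a t; rfl
  | cons p s2 ih =>
    intro m r a t
    simp only [List.foldl_cons]
    show List.foldl pvGroupStep (pvGroupStep (((m, r) :: a) ++ t) p) s2 = _
    unfold pvGroupStep
    by_cases hm : m = p.1
    · simpa [hm] using ih p.1 (r ++ p.2) a t
    · simpa [hm] using ih p.1 p.2 ((m, r) :: a) t

-- characterization of the grouping fold on a key-sorted list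
lemma pvAux (s : List (Int × List Int)) :
    ∀ (m : Int) (r : List Int),
    (∀ q ∈ s, m ≤ q.1) → s.Pairwise (fun a b => a.1 ≤ b.1) →
    ∃ ks : List Int,
      (s.foldl pvGroupStep [(m, r)]).reverse
        = (m, r ++ pvRes s m) :: ks.map (fun k => (k, pvRes s k))
      ∧ (∀ k ∈ ks, m < k) ∧ ks.Pairwise (· < ·)
      ∧ (∀ k, k ∈ ks ↔ k ∈ s.map Prod.fst ∧ k ≠ m) := by
  induction s with
  | nil =>
    intro m r _ _
    exact ⟨[], by simp [pvRes], by simp, by simp, by simp⟩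
  | cons p s2 ih =>
    intro m r hm hs
    have hm2 : ∀ q ∈ s2, p.1 ≤ q.1 := by
      intro q hq; exact (List.pairwise_cons.mp hs).1 q hq
    have hs2 : s2.Pairwise (fun a b => a.1 ≤ b.1) := (List.pairwise_cons.mp hs).2
    by_cases hpm : m = p.1
    · -- current pair extends the open group
      have hstep : (p :: s2).foldl pvGroupStep [(m, r)] = s2.foldl pvGroupStep [(m, r ++ p.2)] := by
        simp [List.foldl_cons, pvGroupStep, hpm]
      obtain ⟨ks, heq, hlt, hpw, hmem⟩ := ih m (r ++ p.2) (by rw [hpm] at *; exact hm2) hs2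
      refine ⟨ks, ?_, hlt, hpw, ?_⟩
      · rw [hstep, heq]
        have hres : pvRes (p :: s2) m = p.2 ++ pvRes s2 m := by
          simp [pvRes, hpm.symm]
        have hmap : ks.map (fun k => (k, pvRes s2 k)) = ks.map (fun k => (k, pvRes (p :: s2) k)) := by
          apply List.map_congr_left
          intro k hk
          have : (p.1 == k) = false := by
            simpa using ne_of_lt (hpm ▸ hlt k hk)
          simp [pvRes, this]
        rw [hres, ← List.append_assoc, hmap]
      · intro k
        rw [hmem k]
        constructor
        · rintro ⟨hk, hne⟩; exact ⟨by simp [hk], hne⟩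
        · rintro ⟨hk, hne⟩
          rcases (by simpa using hk : k = p.1 ∨ k ∈ s2.map Prod.fst) with h | h
          · exact absurd (h.trans hpm.symm) hne
          · exact ⟨h, hne⟩
    · -- new group opens
      have hlt0 : m < p.1 := lt_of_le_of_ne (hm p (by simp)) (by simpa using hpm)
      have hstep : (p :: s2).foldl pvGroupStep [(m, r)]
          = (s2.foldl pvGroupStep [(p.1, p.2)]) ++ [(m, r)] := by
        simp only [List.foldl_cons]
        show List.foldl pvGroupStep (pvGroupStep [(m, r)] p) s2 = _
        have : pvGroupStep [(m, r)] p = ((p.1, p.2) :: []) ++ [(m, r)] := by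
          simp [pvGroupStep, hpm]
        rw [this, pvGroup_append]
      obtain ⟨ks, heq, hlt, hpw, hmem⟩ := ih p.1 p.2 hm2 hs2
      have hfil : (p :: s2).filter (fun q => q.1 == m) = [] := by
        rw [List.filter_eq_nil_iff]
        intro q hq
        simp only [beq_iff_eq]
        rcases List.mem_cons.mp hq with h | h
        · subst h; exact fun h2 => hpm h2.symm
        · exact ne_of_gt (lt_of_lt_of_le hlt0 (hm2 q h))
      have hresm : pvRes (p :: s2) m = [] := by simp [pvRes, hfil]
      refine ⟨p.1 :: ks, ?_, ?_, ?_, ?_⟩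
      · rw [hstep, List.reverse_append, hresm, List.append_nil]
        simp only [List.reverse_cons, List.reverse_nil, List.nil_append, List.map_cons]
        rw [heq]
        have hhead : pvRes (p :: s2) p.1 = p.2 ++ pvRes s2 p.1 := by
          simp [pvRes]
        have hmap : ks.map (fun k => (k, pvRes s2 k)) = ks.map (fun k => (k, pvRes (p :: s2) k)) := by
          apply List.map_congr_left
          intro k hk
          have : (p.1 == k) = false := by simpa using ne_of_lt (hlt k hk)
          simp [pvRes, this]
        rw [hhead, hmap]
        rfl
      · intro k hk
        rcases List.mem_cons.mp hk with h | h
        · exact h ▸ hlt0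
        · exact lt_trans hlt0 (hlt k h)
      · exact List.pairwise_cons.mpr ⟨hlt, hpw⟩
      · intro k
        constructor
        · intro hk
          rcases List.mem_cons.mp hk with h | h
          · exact ⟨by simp [h], h ▸ ne_of_gt hlt0⟩
          · exact ⟨by simp [((hmem k).mp h).1], ne_of_gt (lt_trans hlt0 (hlt k h))⟩
        · rintro ⟨hk, hne⟩
          rcases (by simpa using hk : k = p.1 ∨ k ∈ s2.map Prod.fst) with h | h
          · exact h ▸ List.mem_cons_self
          · by_cases hkp : k = p.1
            · exact hkp ▸ List.mem_cons_self
            · exact List.mem_cons_of_mem _ ((hmem k).mpr ⟨h, hkp⟩)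

-- membership in pvRes only depends on membership in the pair list
lemma pvRes_mem (v w : List (Int × List Int)) (hp : v.Perm w) (k : Int) (a : Int) :
    a ∈ pvRes v k ↔ a ∈ pvRes w k := by
  simp only [pvRes, List.mem_flatMap, List.mem_filter]
  constructor
  · rintro ⟨q, ⟨hq, hq2⟩, ha⟩; exact ⟨q, ⟨hp.mem_iff.mp hq, hq2⟩, ha⟩
  · rintro ⟨q, ⟨hq, hq2⟩, ha⟩; exact ⟨q, ⟨hp.mem_iff.mpr hq, hq2⟩, ha⟩

-- both pre-slice lists coincide: B's grouped scan equals the key-sorted view of the ghost dict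
lemma pvMain (l : List (Int × List Int)) :
    (((PySem.List.sorted l (fun p => p.1) false).foldl pvGroupStep []).reverse).map
        (fun q => (q.1, pvSS q.2))
      = (PySem.List.sorted (l.foldl pvStepB PySem.Dict.empty).keys (fun x => x) false).map
        (fun k => (k, pvSS ((l.foldl pvStepB PySem.Dict.empty).getD k []))) := by
  have hperm : (PySem.List.sorted l (fun p => p.1) false).Perm l := PySem.List.sorted_perm _ _ _
  have hkeys : (l.foldl pvStepB PySem.Dict.empty).keys
      = PySem.Set.update (PySem.Dict.empty (κ := Int) (ν := List Int)).keys (l.map Prod.fst) :=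
    PySem.Dict.keys_foldl_modify_key l Prod.fst [] (fun _ x => fun v => v ++ x.2) PySem.Dict.empty
  have hkmem : ∀ k, k ∈ (l.foldl pvStepB PySem.Dict.empty).keys ↔ k ∈ l.map Prod.fst := by
    intro k
    rw [hkeys, PySem.Dict.keys_empty, PySem.Set.update_nil_left, PySem.Set.mem_ofList]
  have hnodup : (l.foldl pvStepB PySem.Dict.empty).keys.Nodup :=
    PySem.Dict.nodup_keys_foldl_modify_key l Prod.fst [] (fun _ x => fun v => v ++ x.2)
      PySem.Dict.empty PySem.Dict.nodup_keys_empty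
  have hgetD : ∀ k, (l.foldl pvStepB PySem.Dict.empty).getD k [] = pvRes l k := by
    intro k; rw [pvB_getD]; simp [PySem.Dict.getD_empty]
  have hpair : (PySem.List.sorted l (fun p => p.1) false).Pairwise (fun a b => a.1 ≤ b.1) :=
    PySem.List.sorted_pairwise _ _
  cases hsl : PySem.List.sorted l (fun p => p.1) false with
  | nil =>
    have hl : l = [] := (PySem.List.sorted_eq_nil_iff _ _ _).mp hsl
    subst hl
    simp
    exact (PySem.List.sorted_eq_nil_iff _ _ _).mpr rfl
  | cons p s' =>
    rw [hsl] at hperm hpair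
    have hm : ∀ q ∈ s', p.1 ≤ q.1 := (List.pairwise_cons.mp hpair).1
    obtain ⟨ks, heq, hlt, hpw, hmem⟩ := pvAux s' p.1 p.2 hm (List.pairwise_cons.mp hpair).2
    have hfold : (p :: s').foldl pvGroupStep [] = s'.foldl pvGroupStep [(p.1, p.2)] := rfl
    have hKpw : (p.1 :: ks).Pairwise (· < ·) := List.pairwise_cons.mpr ⟨hlt, hpw⟩
    have hKnd : (p.1 :: ks).Nodup := hKpw.imp ne_of_lt
    have hKmem : ∀ a, a ∈ p.1 :: ks ↔ a ∈ (p :: s').map Prod.fst := by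
      intro a
      simp only [List.mem_cons, hmem a, List.map_cons]
      constructor
      · rintro (h | ⟨h, _⟩)
        · exact .inl h
        · exact .inr h
      · rintro (h | h)
        · exact .inl h
        · by_cases hap : a = p.1
          · exact .inl hap
          · exact .inr ⟨h, hap⟩
    have hKsorted : PySem.List.sorted (l.foldl pvStepB PySem.Dict.empty).keys (fun x => x) false
        = p.1 :: ks := by
      apply PySem.List.sorted_eq_of_perm_of_pairwise_lt
      · rw [List.perm_ext_iff_of_nodup hKnd hnodup]
        intro a
        rw [hKmem a, hkmem a, ← (hperm.map Prod.fst).mem_iff]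
      · exact hKpw
    rw [hfold, heq, hKsorted]
    simp only [List.map_cons, List.map_map]
    congr 1
    · -- heads agree
      have h1 : pvRes (p :: s') p.1 = p.2 ++ pvRes s' p.1 := by
        simp [pvRes]
      have hc : pvSS (pvRes (p :: s') p.1) = pvSS (pvRes l p.1) :=
        pvSS_congr _ _ (pvRes_mem _ _ hperm p.1)
      rw [hgetD p.1, ← hc, h1]
    · -- tails agree
      apply List.map_congr_left
      intro k hk
      have hne : (p.1 == k) = false := by simpa using ne_of_lt (hlt k hk)
      have h2 : pvRes s' k = pvRes (p :: s') k := by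
        simp [pvRes, hne]
      have hc : pvSS (pvRes (p :: s') k) = pvSS (pvRes l k) :=
        pvSS_congr _ _ (pvRes_mem _ _ hperm k)
      simp only [Function.comp]
      rw [hgetD k, ← hc, ← h2]

-- ===== VERDICT (by name: the statement is the Claim_ definition above) =====
theorem blend_modulus_filters_spec : Claim_equal_blend_modulus_filters := by
  intro f1 f2 mx _
  unfold Spec_blend_modulus_filters blend_modulus_filters blend_modulus_filters_alt
  show PySem.List.slice (((PySem.List.sorted ((f1 ++ f2).foldl pvStepA PySem.Dict.empty).items (fun q => q.1) false).map (fun q => (q.1, q.2)))) none (some mx)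
    = PySem.List.slice ((((PySem.List.sorted (f1 ++ f2) (fun p => p.1) false).foldl pvGroupStep []).reverse).map (fun q => (q.1, PySem.List.sorted (PySem.Set.ofList q.2) (fun x => x) false))) none (some mx)
  congr 1
  obtain ⟨hk, hv⟩ := pvInv (f1 ++ f2) PySem.Dict.empty PySem.Dict.empty rfl (fun k => rfl)
  have hnodupA : (((f1 ++ f2)).foldl pvStepA PySem.Dict.empty).keys.Nodup := by
    have he : pvStepA = (fun (d : PySem.Dict Int (List Int)) (p : Int × List Int) =>
        d.insert p.1 (if d.contains p.1 then
          PySem.List.sorted (PySem.Set.union (PySem.Set.ofList (d.getD p.1 [])) (PySem.Set.ofList p.2)) (fun x => x) false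
        else PySem.List.sorted (PySem.Set.ofList p.2) (fun x => x) false)) := by
      funext d p; unfold pvStepA; split <;> rfl
    rw [he]
    exact PySem.Dict.nodup_keys_foldl_insert_key _ _ _ _ PySem.Dict.nodup_keys_empty
  rw [pvSortedItems _ hnodupA, List.map_map, hk]
  have hL : (PySem.List.sorted ((f1 ++ f2).foldl pvStepB PySem.Dict.empty).keys (fun x => x) false).map
        ((fun q : Int × List Int => (q.1, q.2)) ∘ fun k => (k, ((f1 ++ f2).foldl pvStepA PySem.Dict.empty).getD k []))
      = (PySem.List.sorted ((f1 ++ f2).foldl pvStepB PySem.Dict.empty).keys (fun x => x) false).map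
        (fun k => (k, pvSS (((f1 ++ f2).foldl pvStepB PySem.Dict.empty).getD k []))) := by
    apply List.map_congr_left
    intro k _
    simp only [Function.comp]
    rw [hv k]
  rw [hL, ← pvMain (f1 ++ f2)]
  rfl
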